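-- pv_equiv track=rewrite | github.com/eliottcassidy2000/math | 04-computation/vt_selfconverse_n21.py | anti_automorphisms
-- ===== SOURCE A (Python) =====
-- from itertools import permutations
--
-- def anti_automorphisms(A):
--     """Find all anti-automorphisms σ: A[σ(i)][σ(j)] = A[j][i]."""
--     n = len(A)
--     antis = []
--     for perm in permutations(range(n)):
--         ok = True
--         for i in range(n):
--             for j in range(n):
--                 if i == j:
--                     continue
--                 if A[perm[i]][perm[j]] != A[j][i]:
--                     ok = False
--                     break
--             if not ok:
--                 break
--         if ok:
--             antis.append(perm)
--     return antis
-- ===== SOURCE B (Python) =====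
-- def anti_automorphisms(A):
--     """Find all anti-automorphisms via backtracking: extend the permutation
--     positionwise and check each new position against the already-assigned ones,
--     pruning whole subtrees early."""
--     n = len(A)
--     antis = []
--
--     def extend(perm):
--         k = len(perm)
--         if k == n:
--             antis.append(tuple(perm))
--             return
--         for v in range(n):
--             if v in perm:
--                 continue
--             if all(A[p][v] == A[k][i] and A[v][p] == A[i][k]
--                    for i, p in enumerate(perm)):
--                 extend(perm + (v,))
--
--     extend(())
--     return antis
-- ===== Notes on version B (the rewrite author's own statement) =====
-- stated objective: faster
-- what changed: Replaces generate-all-permutations-then-check with positionwise backtracking that checks each newly assigned index against the already-assigned ones and prunes whole subtrees on the first violated constraint.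
-- outside the precondition, e.g. on anti_automorphisms([[1, 2], [3]]): A returns [(1, 0)], B returns [(1, 0)]
import Mathlib
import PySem

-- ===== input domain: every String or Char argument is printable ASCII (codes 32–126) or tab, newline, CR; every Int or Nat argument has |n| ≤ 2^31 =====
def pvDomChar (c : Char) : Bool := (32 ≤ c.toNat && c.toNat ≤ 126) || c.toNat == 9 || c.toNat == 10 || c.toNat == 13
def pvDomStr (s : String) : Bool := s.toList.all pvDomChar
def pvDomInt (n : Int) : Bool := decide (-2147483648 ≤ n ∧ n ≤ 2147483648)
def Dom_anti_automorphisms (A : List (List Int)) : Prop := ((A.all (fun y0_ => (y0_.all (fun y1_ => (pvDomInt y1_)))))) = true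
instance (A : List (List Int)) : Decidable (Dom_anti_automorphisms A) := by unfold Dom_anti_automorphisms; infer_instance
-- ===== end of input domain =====

-- B replaces generate-all-permutations-then-check with positionwise backtracking that
-- prunes a whole subtree as soon as one constraint among the assigned indices fails
-- (measurably faster on the timed inputs; equal output, same lexicographic order).

-- ===== PORT A =====
-- xs[i] for an index known to be in range on Pre_ (0 outside, never reached under Pre_)
def pvGetA (xs : List Int) (i : Int) : Int := (PySem.List.pyGet? xs i).getD 0
def pvRowA (A : List (List Int)) (i : Int) : List Int := (PySem.List.pyGet? A i).getD []
-- A[p][q]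
def pvEntA (A : List (List Int)) (p q : Int) : Int := pvGetA (pvRowA A p) q

-- itertools.permutations(range(n)) in lexicographic order: pick each remaining element
-- in list order, recurse on the rest; fuel = length of the remaining list.
def pvPermsA : Nat → List Int → List (List Int)
  | 0, _ => [[]]
  | fuel + 1, l => l.flatMap (fun x => (pvPermsA fuel (l.erase x)).map (fun c => x :: c))

-- inner 'for j in range(n)' with its break (returns False at the first mismatch)
def pvCheckJ (A : List (List Int)) (perm : List Int) (i : Int) : List Int → Bool
  | [] => true
  | j :: js =>
    if i = j then pvCheckJ A perm i js
    else if pvEntA A (pvGetA perm i) (pvGetA perm j) ≠ pvEntA A j i then false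
    else pvCheckJ A perm i js

-- outer 'for i in range(n)' with its break
def pvCheckI (A : List (List Int)) (perm : List Int) (rng : List Int) : List Int → Bool
  | [] => true
  | i :: is => if pvCheckJ A perm i rng then pvCheckI A perm rng is else false

def anti_automorphisms (A : List (List Int)) : List (List Int) :=
  let n := A.length
  let rng : List Int := PySem.List.pyRange 0 (n : Int) 1
  (pvPermsA n rng).foldl
    (fun antis perm => if pvCheckI A perm rng rng then antis ++ [perm] else antis) []

-- ===== PORT B =====
def pvGetB (xs : List Int) (i : Int) : Int := (PySem.List.pyGet? xs i).getD 0
def pvRowB (A : List (List Int)) (i : Int) : List Int := (PySem.List.pyGet? A i).getD []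
def pvEntB (A : List (List Int)) (p q : Int) : Int := pvGetB (pvRowB A p) q

-- all(A[p][v] == A[k][i] and A[v][p] == A[i][k] for i, p in enumerate(perm))
def pvStepB (A : List (List Int)) (pfx : List Int) (v : Int) : Bool :=
  (PySem.List.enumerate pfx).all (fun ip =>
    (pvEntB A ip.2 v == pvEntB A (pfx.length : Int) ip.1) &&
    (pvEntB A v ip.2 == pvEntB A ip.1 (pfx.length : Int)))

-- the recursive extend(perm); fuel = number of positions still to fill
def pvExtend (A : List (List Int)) (n : Nat) : Nat → List Int → List (List Int)
  | 0, pfx => if pfx.length = n then [pfx] else []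
  | fuel + 1, pfx =>
    if pfx.length = n then [pfx]
    else
      (PySem.List.pyRange 0 (n : Int) 1).flatMap (fun v =>
        if v ∈ pfx then []
        else if pvStepB A pfx v then pvExtend A n fuel (pfx ++ [v]) else [])

def anti_automorphisms_alt (A : List (List Int)) : List (List Int) :=
  pvExtend A A.length A.length []

-- ===== PRECONDITION & SPEC =====
-- Pre_ admits matrices whose rows all have at least len(A) entries (plus the trivial
-- sizes 0 and 1, where nothing is indexed): there the Python A always returns. On
-- matrices with a too-short row A raises IndexError unless an earlier mismatch happens
-- to break the scan first; that value-dependent set is not closed-form, so those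
-- inputs are excluded even though, when A does return there, B returns the same list.
def Pre_anti_automorphisms (A : List (List Int)) : Prop :=
  A.length ≤ 1 ∨ ∀ row ∈ A, A.length ≤ row.length
instance (A : List (List Int)) : Decidable (Pre_anti_automorphisms A) := by
  unfold Pre_anti_automorphisms; infer_instance

def pvWitness_anti_automorphisms : List (List Int) := [[0, 1], [1, 0]]

def Spec_anti_automorphisms (A : List (List Int)) (out : List (List Int)) : Prop := out = anti_automorphisms_alt A
instance (A : List (List Int)) (out : List (List Int)) : Decidable (Spec_anti_automorphisms A out) := by unfold Spec_anti_automorphisms; infer_instance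

-- ===== CLAIM (what is proved, stated in full; the proofs are below) =====
def Claim_equal_anti_automorphisms : Prop := ∀ (A : List (List Int)), Dom_anti_automorphisms A → Pre_anti_automorphisms A → Spec_anti_automorphisms A (anti_automorphisms A)

-- ===== LEMMAS AND PROOFS =====

-- B-side helpers are definitionally A-side helpers
theorem pvEntB_eq : pvEntB = pvEntA := rfl

-- the constraint one entry (i, k), i < k, of a (partial) assignment p must satisfy
def pvStepAt (A : List (List Int)) (p : List Int) (k : Nat) : Prop :=
  ∀ i : Nat, i < k →
    (pvEntA A (p.getD i 0) (p.getD k 0) = pvEntA A (k : Int) (i : Int) ∧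
     pvEntA A (p.getD k 0) (p.getD i 0) = pvEntA A (i : Int) (k : Int))

-- the chain of pvStepB checks performed while appending c to pfx
def pvExtOk (A : List (List Int)) : List Int → List Int → Bool
  | _, [] => true
  | pfx, v :: c => pvStepB A pfx v && pvExtOk A (pfx ++ [v]) c

theorem checkJ_eq (A : List (List Int)) (p : List Int) (i : Int) (js : List Int) :
    pvCheckJ A p i js =
      js.all (fun j => decide (i = j) ||
        decide (pvEntA A (pvGetA p i) (pvGetA p j) = pvEntA A j i)) := by
  induction js with
  | nil => rfl
  | cons j js ih =>
    by_cases h1 : i = j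
    · subst h1; simp [pvCheckJ, List.all_cons, ih]
    · by_cases h2 : pvEntA A (pvGetA p i) (pvGetA p j) = pvEntA A j i
      · simp [pvCheckJ, h1, h2, List.all_cons, ih]
      · simp [pvCheckJ, h1, h2, List.all_cons]

theorem checkI_eq (A : List (List Int)) (p : List Int) (rng is : List Int) :
    pvCheckI A p rng is = is.all (fun i => pvCheckJ A p i rng) := by
  induction is with
  | nil => rfl
  | cons i is ih =>
    simp only [pvCheckI, List.all_cons]
    split_ifs with h <;> simp [h, ih]


theorem pvGetA_of_nonneg (p : List Int) (i : Int) (h0 : 0 ≤ i) :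
    pvGetA p i = p.getD i.toNat 0 := by
  simp [pvGetA, PySem.List.pyGet?_of_nonneg p h0, List.getD_eq_getElem?_getD]

theorem getD_append_lt (p t : List Int) (i : Nat) (h : i < p.length) :
    (p ++ t).getD i 0 = p.getD i 0 := List.getD_append p t 0 i h

theorem getD_append_self (p : List Int) (v : Int) (t : List Int) :
    ((p ++ v :: t)).getD p.length 0 = v := by
  simp [List.getD_eq_getElem?_getD]

theorem stepB_iff (A : List (List Int)) (pfx : List Int) (v : Int) :
    pvStepB A pfx v = true ↔ pvStepAt A (pfx ++ [v]) pfx.length := by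
  have h1 : ∀ (i : Nat) (hi : i < pfx.length), (pfx ++ [v]).getD i 0 = pfx[i]'hi := by
    intro i hi
    rw [getD_append_lt _ _ _ hi]
    simp [List.getD_eq_getElem?_getD, List.getElem?_eq_getElem hi]
  have h2 : (pfx ++ [v]).getD pfx.length 0 = v := getD_append_self pfx v []
  simp only [pvStepB, pvEntB_eq, List.all_eq_true, PySem.List.mem_enumerate_iff, pvStepAt]
  constructor
  · intro h i hi
    have := h (0 + (i : Int), pfx[i]'hi) ⟨i, hi, rfl⟩
    simp only [Bool.and_eq_true, beq_iff_eq] at this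
    rw [h1 i hi, h2]
    constructor
    · have := this.1; rw [zero_add] at this; exact_mod_cast this
    · have := this.2; rw [zero_add] at this; exact_mod_cast this
  · intro h ip hip
    obtain ⟨k, hk, rfl⟩ := hip
    have := h k hk
    rw [h1 k hk, h2] at this
    simp only [Bool.and_eq_true, beq_iff_eq, zero_add]
    exact ⟨this.1, this.2⟩

theorem stepAt_take (A : List (List Int)) (p t : List Int) (k : Nat) (hk : k < p.length) :
    pvStepAt A (p ++ t) k ↔ pvStepAt A p k := by
  unfold pvStepAt
  apply forall_congr'
  intro i
  apply imp_congr_right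
  intro hi
  rw [getD_append_lt _ _ _ (by omega), getD_append_lt _ _ _ hk]

theorem extOk_iff (A : List (List Int)) :
    ∀ (c pfx : List Int), pvExtOk A pfx c = true ↔
      ∀ k : Nat, pfx.length ≤ k → k < pfx.length + c.length → pvStepAt A (pfx ++ c) k := by
  intro c
  induction c with
  | nil =>
    intro pfx
    simp only [pvExtOk, List.length_nil, Nat.add_zero, List.append_nil, true_iff]
    intro k h1 h2
    exact absurd h2 (by omega)
  | cons v c ih =>
    intro pfx
    have hassoc : pfx ++ v :: c = (pfx ++ [v]) ++ c := by simp
    have hlen : (pfx ++ [v]).length = pfx.length + 1 := by simp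
    simp only [pvExtOk, Bool.and_eq_true, stepB_iff, ih (pfx ++ [v]), hlen, hassoc,
      List.length_cons]
    constructor
    · rintro ⟨h0, h⟩ k hk1 hk2
      rcases Nat.eq_or_lt_of_le hk1 with heq | hk1'
      · rw [← heq]
        exact (stepAt_take A (pfx ++ [v]) c pfx.length (by omega)).mpr h0
      · exact h k (by omega) (by omega)
    · intro h
      refine ⟨(stepAt_take A (pfx ++ [v]) c pfx.length (by omega)).mp
          (h pfx.length le_rfl (by omega)), ?_⟩
      intro k hk1 hk2
      exact h k (by omega) (by omega)

theorem steps_iff_pairs (A : List (List Int)) (p : List Int) (n : Nat) :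
    (∀ k : Nat, k < n → pvStepAt A p k) ↔
    (∀ i j : Nat, i < n → j < n → i ≠ j →
      pvEntA A (p.getD i 0) (p.getD j 0) = pvEntA A (j : Int) (i : Int)) := by
  constructor
  · intro h i j hi hj hne
    rcases Nat.lt_or_ge i j with hij | hij
    · exact ((h j hj) i hij).1
    · exact ((h i hi) j (by omega)).2
  · intro h k hk i hik
    exact ⟨h i k (by omega) hk (by omega), h k i hk (by omega) (by omega)⟩

theorem checkI_iff (A : List (List Int)) (p : List Int) (n : Nat) :
    pvCheckI A p (PySem.List.pyRange 0 (n : Int) 1) (PySem.List.pyRange 0 (n : Int) 1) = true ↔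
    ∀ i j : Nat, i < n → j < n → i ≠ j →
      pvEntA A (p.getD i 0) (p.getD j 0) = pvEntA A (j : Int) (i : Int) := by
  simp only [checkI_eq, checkJ_eq, List.all_eq_true, PySem.List.mem_pyRange_one,
    Bool.or_eq_true, decide_eq_true_eq]
  constructor
  · intro h i j hi hj hne
    have := h (i : Int) ⟨by positivity, by exact_mod_cast hi⟩ (j : Int)
      ⟨by positivity, by exact_mod_cast hj⟩
    rcases this with heq | hval
    · exact absurd (by exact_mod_cast heq) hne
    · rwa [pvGetA_of_nonneg _ _ (by positivity), pvGetA_of_nonneg _ _ (by positivity),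
        Int.toNat_natCast, Int.toNat_natCast] at hval
  · intro h i hi j hj
    by_cases heq : i = j
    · exact Or.inl heq
    · right
      have hi' : i = ((i.toNat : Nat) : Int) := by omega
      have hj' : j = ((j.toNat : Nat) : Int) := by omega
      rw [pvGetA_of_nonneg _ _ (by omega), pvGetA_of_nonneg _ _ (by omega), hi', hj']
      exact h i.toNat j.toNat (by omega) (by omega) (by omega)

theorem perms_length (fuel : Nat) :
    ∀ (l : List Int), l.length = fuel → ∀ c ∈ pvPermsA fuel l, c.length = fuel := by
  induction fuel with
  | zero =>
    intro l _ c hc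
    simp only [pvPermsA, List.mem_singleton] at hc
    simp [hc]
  | succ f ih =>
    intro l hl c hc
    simp only [pvPermsA, List.mem_flatMap, List.mem_map] at hc
    obtain ⟨x, hx, c', hc', rfl⟩ := hc
    have hel : (l.erase x).length = f := by rw [List.length_erase_of_mem hx]; omega
    simp [ih _ hel c' hc']

theorem flatMap_skip {α β : Type} [DecidableEq α] (l s : List α) (G : α → List β) :
    (l.flatMap (fun v => if v ∈ s then [] else G v)) =
      (l.filter (fun v => !decide (v ∈ s))).flatMap G := by
  induction l with
  | nil => rfl
  | cons x l ih => by_cases h : x ∈ s <;> simp [h, ih]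

theorem flatMap_congr_mem {α β : Type} (l : List α) (f g : α → List β)
    (h : ∀ x ∈ l, f x = g x) : l.flatMap f = l.flatMap g := by
  induction l with
  | nil => rfl
  | cons x l ih =>
    simp only [List.flatMap_cons, h x (List.mem_cons_self), ih (fun y hy => h y (List.mem_cons_of_mem x hy))]

theorem filterMap_guard (l : List (List Int)) (q r : List Int → Bool)
    (h : ∀ c ∈ l, r c = q c) :
    l.filterMap (fun c => if q c then some c else none) = l.filter r := by
  induction l with
  | nil => rfl
  | cons c l ih =>
    have ih' := ih (fun y hy => h y (List.mem_cons_of_mem c hy))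
    have hc := h c List.mem_cons_self
    by_cases hq : q c <;> simp [hq, hc ▸ hq, ih']

theorem anti_eq_filter (A : List (List Int)) :
    anti_automorphisms A =
      (pvPermsA A.length (PySem.List.pyRange 0 (A.length : Int) 1)).filter
        (fun p => pvCheckI A p (PySem.List.pyRange 0 (A.length : Int) 1)
          (PySem.List.pyRange 0 (A.length : Int) 1)) := by
  unfold anti_automorphisms
  simpa using PySem.List.foldl_append_if
    (fun p => pvCheckI A p (PySem.List.pyRange 0 (A.length : Int) 1)
      (PySem.List.pyRange 0 (A.length : Int) 1)) id
    (pvPermsA A.length (PySem.List.pyRange 0 (A.length : Int) 1)) []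

theorem extend_eq (A : List (List Int)) (n : Nat) :
    ∀ (fuel : Nat) (pfx rem : List Int),
      rem = (PySem.List.pyRange 0 (n : Int) 1).filter (fun v => !decide (v ∈ pfx)) →
      rem.length = fuel → pfx.length + fuel = n →
      pvExtend A n fuel pfx =
        (pvPermsA fuel rem).filterMap
          (fun c => if pvExtOk A pfx c then some (pfx ++ c) else none) := by
  intro fuel
  induction fuel generalizing n with
  | zero =>
    intro pfx rem h1 h2 h3
    have : pfx.length = n := by omega
    simp [pvExtend, pvPermsA, pvExtOk, this]
  | succ f ih =>
    intro pfx rem h1 h2 h3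
    have hne : pfx.length ≠ n := by omega
    rw [show pvExtend A n (f + 1) pfx = if pfx.length = n then [pfx] else
        (PySem.List.pyRange 0 (n : Int) 1).flatMap (fun v =>
          if v ∈ pfx then []
          else if pvStepB A pfx v then pvExtend A n f (pfx ++ [v]) else []) from rfl,
      if_neg hne]
    rw [show pvPermsA (f + 1) rem =
        rem.flatMap (fun x => (pvPermsA f (rem.erase x)).map (fun c => x :: c)) from rfl]
    rw [List.filterMap_flatMap]
    rw [flatMap_skip, ← h1]
    apply flatMap_congr_mem
    intro v hv
    have hvrng : v ∈ PySem.List.pyRange 0 (n : Int) 1 := by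
      rw [h1] at hv; exact List.mem_of_mem_filter hv
    have hvnp : v ∉ pfx := by
      rw [h1] at hv
      have := List.of_mem_filter hv
      simpa using this
    rw [List.filterMap_map]
    by_cases hs : pvStepB A pfx v
    · rw [if_pos hs]
      have hnodup : rem.Nodup := h1 ▸ (PySem.List.nodup_pyRange_one 0 (n : Int)).filter _
      have hrem' : rem.erase v =
          (PySem.List.pyRange 0 (n : Int) 1).filter (fun w => !decide (w ∈ pfx ++ [v])) := by
        rw [List.Nodup.erase_eq_filter hnodup v, h1, List.filter_filter]
        apply List.filter_congr
        intro w _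
        by_cases h1w : w ∈ pfx <;> by_cases h2w : w = v <;>
          simp [h1w, h2w, List.mem_append]
      have hlen' : (rem.erase v).length = f := by rw [List.length_erase_of_mem hv]; omega
      rw [ih n (pfx ++ [v]) (rem.erase v) hrem' hlen' (by simp; omega)]
      refine List.filterMap_congr ?_
      intro c _
      simp [Function.comp, pvExtOk, hs, List.append_assoc]
    · rw [if_neg hs]
      symm
      simp only [List.filterMap_eq_nil_iff]
      intro c hc
      simp [Function.comp, pvExtOk, hs]

theorem main_eq (A : List (List Int)) : anti_automorphisms A = anti_automorphisms_alt A := by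
  have hrng_len : (PySem.List.pyRange 0 (A.length : Int) 1).length = A.length := by
    simp [PySem.List.length_pyRange_one]
  rw [anti_eq_filter]
  unfold anti_automorphisms_alt
  rw [extend_eq A A.length A.length [] (PySem.List.pyRange 0 (A.length : Int) 1)
    (by simp) hrng_len (by simp)]
  simp only [List.nil_append]
  symm
  apply filterMap_guard
  intro c hc
  have hclen : c.length = A.length := perms_length A.length _ hrng_len c hc
  rw [Bool.eq_iff_iff, checkI_iff A c A.length]
  rw [extOk_iff A c []]
  simp only [List.length_nil, Nat.zero_le, Nat.zero_add, List.nil_append, true_implies]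
  rw [hclen]
  exact (steps_iff_pairs A c A.length).symm


-- ===== VERDICT (by name: the statement is the Claim_ definition above) =====
theorem anti_automorphisms_spec : Claim_equal_anti_automorphisms := by
  intro A _ _
  exact main_eq A
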